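-- pv_equiv track=rewrite | github.com/bigchan22/Ptab | src/data/Data_gen_utils.py | cluster_vertices
-- ===== SOURCE A (Python) =====
-- def cluster_vertices(P):
--     n = len(P)
--     arr = [0 for i in range(n)]
--     k = 0
--     for i in range(1, len(P)):
--         if P[i - 1] != P[i]:
--             for j in range(P[i - 1], P[i]):
--                 arr[j] += i
--             k += 1
--         arr[i] += k
--     vertices = [[1]]
--     for i in range(1, len(P)):
--         if arr[i - 1] == arr[i]:
--             vertices[-1].append(i + 1)
--         else:
--             vertices.append([i + 1])
--     return vertices
-- ===== SOURCE B (Python) =====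
-- def cluster_vertices(P):
--     n = len(P)
--     # difference array: step i adds i to arr[P[i-1] : P[i]]
--     diff = [0] * (n + 1)
--     for i in range(1, n):
--         a, b = P[i - 1], P[i]
--         if a < b:
--             diff[a] += i
--             diff[b] -= i
--     # single fused pass: running prefix sum of diff + running change count
--     vertices = [[1]]
--     run = diff[0]
--     prev = run
--     k = 0
--     for i in range(1, n):
--         run += diff[i]
--         if P[i - 1] != P[i]:
--             k += 1
--         cur = run + k
--         if cur == prev:
--             vertices[-1].append(i + 1)
--         else:
--             vertices.append([i + 1])
--         prev = cur
--     return vertices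
-- ===== Notes on version B (the rewrite author's own statement) =====
-- stated objective: alternative
-- what changed: Replaces A's explicit inner loop over range(P[i-1],P[i]) (adding i to each cell of arr) with a difference array updated in O(1) per step, and fuses the prefix-sum reconstruction with the grouping pass, so the arr list is never materialised; per-step work becomes O(1) instead of O(range width).
-- outside the precondition, e.g. on cluster_vertices([-2, -1]): A returns [[1, 2]], B returns [[1], [2]]
import Mathlib
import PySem

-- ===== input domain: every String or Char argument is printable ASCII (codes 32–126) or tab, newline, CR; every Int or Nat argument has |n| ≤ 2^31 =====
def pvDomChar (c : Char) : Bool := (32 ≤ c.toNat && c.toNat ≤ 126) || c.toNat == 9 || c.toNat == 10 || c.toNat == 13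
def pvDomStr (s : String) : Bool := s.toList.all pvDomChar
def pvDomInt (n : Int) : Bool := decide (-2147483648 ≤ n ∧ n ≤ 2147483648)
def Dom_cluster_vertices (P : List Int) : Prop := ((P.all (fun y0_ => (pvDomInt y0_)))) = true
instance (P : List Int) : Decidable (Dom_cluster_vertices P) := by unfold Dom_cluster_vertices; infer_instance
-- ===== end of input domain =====

-- B replaces A's explicit inner range-add loop by a difference array with a fused
-- prefix-sum + grouping pass: a different algorithm of the same measured cost.


-- ===== PORT A =====
-- vertices[-1].append(x)
def cvAppendLast : List (List Int) → Int → List (List Int)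
  | [], _ => []
  | [g], x => [g ++ [x]]
  | g :: rest, x => g :: cvAppendLast rest x

-- body of A's outer loop over i (state: (arr, k))
def cvStepA (P : List Int) (s : List Int × Int) (i : Int) : List Int × Int :=
  let s1 :=
    if PySem.List.pyGetD P (i-1) 0 ≠ PySem.List.pyGetD P i 0 then
      (((PySem.List.pyRange (PySem.List.pyGetD P (i-1) 0) (PySem.List.pyGetD P i 0) 1).foldl
          (fun ar j => PySem.List.pySetD ar j (PySem.List.pyGetD ar j 0 + i)) s.1),
       s.2 + 1)
    else s
  (PySem.List.pySetD s1.1 i (PySem.List.pyGetD s1.1 i 0 + s1.2), s1.2)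

-- body of A's grouping loop over i
def cvGroupA (arr : List Int) (vs : List (List Int)) (i : Int) : List (List Int) :=
  if PySem.List.pyGetD arr (i-1) 0 = PySem.List.pyGetD arr i 0 then cvAppendLast vs (i+1)
  else vs ++ [[i+1]]

def cluster_vertices (P : List Int) : List (List Int) :=
  let n : Int := P.length
  let arr0 : List Int := List.replicate P.length 0
  let st := (PySem.List.pyRange 1 n 1).foldl (cvStepA P) (arr0, 0)
  (PySem.List.pyRange 1 n 1).foldl (cvGroupA st.1) [[1]]

-- ===== PORT B =====
-- body of B's difference-array loop: diff[P[i-1]] += i; diff[P[i]] -= i on ascending steps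
def cvStepD (P : List Int) (d : List Int) (i : Int) : List Int :=
  let a := PySem.List.pyGetD P (i-1) 0
  let b := PySem.List.pyGetD P i 0
  if a < b then
    let d1 := PySem.List.pySetD d a (PySem.List.pyGetD d a 0 + i)
    PySem.List.pySetD d1 b (PySem.List.pyGetD d1 b 0 - i)
  else d

-- body of B's fused prefix-sum/grouping loop (state: (vertices, run, prev, k))
def cvStepB (P diff : List Int) (s : List (List Int) × Int × Int × Int) (i : Int) :
    List (List Int) × Int × Int × Int :=
  let run := s.2.1 + PySem.List.pyGetD diff i 0
  let k := if PySem.List.pyGetD P (i-1) 0 ≠ PySem.List.pyGetD P i 0 then s.2.2.2 + 1 else s.2.2.2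
  let cur := run + k
  let vs := if cur = s.2.2.1 then cvAppendLast s.1 (i+1) else s.1 ++ [[i+1]]
  (vs, run, cur, k)

def cluster_vertices_alt (P : List Int) : List (List Int) :=
  let n : Int := P.length
  let diff0 : List Int := List.replicate (P.length + 1) 0
  let diff := (PySem.List.pyRange 1 n 1).foldl (cvStepD P) diff0
  let run0 := PySem.List.pyGetD diff 0 0
  let st := (PySem.List.pyRange 1 n 1).foldl (cvStepB P diff) ([[1]], run0, run0, 0)
  st.1

-- ===== PRECONDITION & SPEC =====
-- Pre_ excludes inputs with an ascending step P[i-1] < P[i] whose index range [P[i-1], P[i])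
-- leaves [0, len(P)): there A either raises IndexError or silently range-adds through Python's
-- negative-index wraparound into the n-cell arr — an accident of the backing array no caller
-- would specify (B's n+1-cell difference array wraps or raises differently there, agreeing
-- with A on some such inputs only by accident).
def Pre_cluster_vertices (P : List Int) : Prop :=
  ∀ i ∈ PySem.List.pyRange 1 (P.length : Int) 1,
    PySem.List.pyGetD P (i-1) 0 < PySem.List.pyGetD P i 0 →
      0 ≤ PySem.List.pyGetD P (i-1) 0 ∧ PySem.List.pyGetD P i 0 ≤ (P.length : Int)
instance (P : List Int) : Decidable (Pre_cluster_vertices P) := by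
  unfold Pre_cluster_vertices; infer_instance

def pvWitness_cluster_vertices : List Int := [1, 2, 2, 1]

def Spec_cluster_vertices (P : List Int) (out : List (List Int)) : Prop := out = cluster_vertices_alt P
instance (P : List Int) (out : List (List Int)) : Decidable (Spec_cluster_vertices P out) := by unfold Spec_cluster_vertices; infer_instance

-- ===== CLAIM (what is proved, stated in full; the proofs are below) =====
def Claim_equal_cluster_vertices : Prop := ∀ (P : List Int), Dom_cluster_vertices P → Pre_cluster_vertices P → Spec_cluster_vertices P (cluster_vertices P)

-- ===== LEMMAS AND PROOFS =====

-- contribution of step i to arr[m], and its sums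
def cvStep (P : List Int) (i m : Int) : Int :=
  if PySem.List.pyGetD P (i-1) 0 ≤ m ∧ m < PySem.List.pyGetD P i 0 then i else 0
def cvS (P : List Int) (t m : Int) : Int :=
  ((PySem.List.pyRange 1 t 1).map (fun i => cvStep P i m)).sum
def cvC (P : List Int) (t : Int) : Int :=
  ((PySem.List.pyRange 1 t 1).countP
    (fun i => !(PySem.List.pyGetD P (i-1) 0 == PySem.List.pyGetD P i 0)) : Nat)
-- the final value of A's arr at index m
def cvG (P : List Int) (m : Int) : Int :=
  cvS P (P.length) m + (if 1 ≤ m then cvC P (m+1) else 0)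
-- prefix sum of a list's entries up to index m
def sumTo (d : List Int) (m : Nat) : Int :=
  ((List.range (m+1)).map (fun j => d.getD j 0)).sum

theorem cvGetD_set_self (l : List Int) (a : Nat) (v : Int) (h : a < l.length) :
    (l.set a v).getD a 0 = v := by
  simp [List.getD_eq_getElem?_getD, h]

theorem cvGetD_set_ne (l : List Int) (a m : Nat) (v : Int) (h : a ≠ m) :
    (l.set a v).getD m 0 = l.getD m 0 := by
  simp [List.getD_eq_getElem?_getD, h]

theorem cvGetD_replicate (n m : Nat) : (List.replicate n (0:Int)).getD m 0 = 0 := by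
  simp [List.getD_eq_getElem?_getD, List.getElem?_replicate]
  split <;> rfl

theorem sumTo_succ (d : List Int) (m : Nat) :
    sumTo d (m+1) = sumTo d m + d.getD (m+1) 0 := by
  simp [sumTo, List.range_succ]
  ring

theorem cvS_succ (P : List Int) (t : Nat) (m : Int) (ht : 1 ≤ t) :
    cvS P ((t : Int) + 1) m = cvS P t m + cvStep P t m := by
  unfold cvS
  rw [PySem.List.pyRange_one_succ_right (by exact_mod_cast ht : (1:Int) ≤ (t:Int))]
  simp

theorem cvC_succ (P : List Int) (t : Nat) (ht : 1 ≤ t) :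
    cvC P ((t : Int) + 1) =
      cvC P t + (if PySem.List.pyGetD P ((t : Int)-1) 0 ≠ PySem.List.pyGetD P t 0 then 1 else 0) := by
  unfold cvC
  rw [PySem.List.pyRange_one_succ_right (by exact_mod_cast ht : (1:Int) ≤ (t:Int))]
  rw [List.countP_append]
  by_cases h : PySem.List.pyGetD P ((t : Int)-1) 0 = PySem.List.pyGetD P (t : Int) 0 <;>
    simp [List.countP_cons, h]

theorem innerAddAux (i b : Int) (fuel : Nat) :
    ∀ (a : Int) (arr : List Int), (b - a).toNat ≤ fuel → 0 ≤ a → b ≤ (arr.length : Int) →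
    ((PySem.List.pyRange a b 1).foldl
        (fun ar j => PySem.List.pySetD ar j (PySem.List.pyGetD ar j 0 + i)) arr).length
      = arr.length ∧
    ∀ m : Nat,
      ((PySem.List.pyRange a b 1).foldl
        (fun ar j => PySem.List.pySetD ar j (PySem.List.pyGetD ar j 0 + i)) arr).getD m 0
      = arr.getD m 0 + (if a ≤ (m : Int) ∧ (m : Int) < b then i else 0) := by
  induction fuel with
  | zero =>
    intro a arr hf ha hb
    have hba : b ≤ a := by omega
    rw [PySem.List.pyRange_one_eq_nil hba]
    constructor
    · rfl
    · intro m
      have : ¬ (a ≤ (m:Int) ∧ (m:Int) < b) := by omega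
      simp [this]
  | succ fuel ih =>
    intro a arr hf ha hb
    by_cases hab : b ≤ a
    · rw [PySem.List.pyRange_one_eq_nil hab]
      constructor
      · trivial
      · intro m
        have : ¬ (a ≤ (m:Int) ∧ (m:Int) < b) := by omega
        simp [this]
    · have hab' : a < b := by omega
      rw [PySem.List.pyRange_one_cons hab']
      simp only [List.foldl_cons]
      have ha1 : PySem.List.pySetD arr a (PySem.List.pyGetD arr a 0 + i)
          = arr.set a.toNat (arr.getD a.toNat 0 + i) := by
        rw [PySem.List.pySetD_of_nonneg arr _ ha, PySem.List.pyGetD_of_nonneg arr _ ha]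
      rw [ha1]
      have hlen1 : (arr.set a.toNat (arr.getD a.toNat 0 + i)).length = arr.length := by simp
      obtain ⟨hL, hG⟩ := ih (a+1) (arr.set a.toNat (arr.getD a.toNat 0 + i))
        (by omega) (by omega) (by rw [hlen1]; exact hb)
      refine ⟨by rw [hL, hlen1], ?_⟩
      intro m
      rw [hG m]
      have haN : a.toNat < arr.length := by omega
      by_cases hm : (m:Int) = a
      · have hmn : a.toNat = m := by omega
        subst hmn
        rw [cvGetD_set_self arr _ _ haN]
        have h1 : ¬ (a + 1 ≤ ((a.toNat : Nat) : Int) ∧ ((a.toNat : Nat) : Int) < b) := by omega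
        have h2 : a ≤ ((a.toNat : Nat) : Int) ∧ ((a.toNat : Nat) : Int) < b := by omega
        rw [if_neg h1, if_pos h2]
        ring
      · rw [cvGetD_set_ne arr _ m _ (by omega)]
        by_cases hc : a ≤ (m:Int) ∧ (m:Int) < b
        · have hc' : a + 1 ≤ (m:Int) ∧ (m:Int) < b := by omega
          rw [if_pos hc, if_pos hc']
        · have hc' : ¬ (a + 1 ≤ (m:Int) ∧ (m:Int) < b) := by omega
          rw [if_neg hc, if_neg hc']


-- A's inner range-add loop, pointwise
theorem innerAdd (i a b : Int) (arr : List Int) (ha : 0 ≤ a) (hb : b ≤ (arr.length : Int)) :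
    ((PySem.List.pyRange a b 1).foldl
        (fun ar j => PySem.List.pySetD ar j (PySem.List.pyGetD ar j 0 + i)) arr).length
      = arr.length ∧
    ∀ m : Nat,
      ((PySem.List.pyRange a b 1).foldl
        (fun ar j => PySem.List.pySetD ar j (PySem.List.pyGetD ar j 0 + i)) arr).getD m 0
      = arr.getD m 0 + (if a ≤ (m : Int) ∧ (m : Int) < b then i else 0) := by
  refine innerAddAux i b (b - a).toNat a arr (le_refl _) ha hb

-- ranges up to 1 are empty
theorem cvC_le_one (P : List Int) (t : Int) (h : t ≤ 1) : cvC P t = 0 := by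
  unfold cvC; rw [PySem.List.pyRange_one_eq_nil h]; rfl

theorem cvS_le_one (P : List Int) (t m : Int) (h : t ≤ 1) : cvS P t m = 0 := by
  unfold cvS; rw [PySem.List.pyRange_one_eq_nil h]; rfl

-- the intermediate state s1 of A's outer loop body
def cvS1 (P : List Int) (st : List Int × Int) (i : Int) : List Int × Int :=
  if PySem.List.pyGetD P (i-1) 0 ≠ PySem.List.pyGetD P i 0 then
    (((PySem.List.pyRange (PySem.List.pyGetD P (i-1) 0) (PySem.List.pyGetD P i 0) 1).foldl
        (fun ar j => PySem.List.pySetD ar j (PySem.List.pyGetD ar j 0 + i)) st.1),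
     st.2 + 1)
  else st

theorem cvStepA_eq (P : List Int) (st : List Int × Int) (i : Int) :
    cvStepA P st i
      = (PySem.List.pySetD (cvS1 P st i).1 i (PySem.List.pyGetD (cvS1 P st i).1 i 0 + (cvS1 P st i).2),
         (cvS1 P st i).2) := rfl

-- one step of A's outer loop preserves the invariant
theorem stepA_char (P : List Int) (hpre : Pre_cluster_vertices P) (t : Nat)
    (ht1 : 1 ≤ t) (ht : t + 1 ≤ P.length)
    (st : List Int × Int) (hL : st.1.length = P.length) (hK : st.2 = cvC P t)
    (hG : ∀ m : Nat, st.1.getD m 0 = cvS P t m + (if 1 ≤ m ∧ m < t then cvC P ((m:Int)+1) else 0)) :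
    (cvStepA P st t).1.length = P.length ∧
    (cvStepA P st t).2 = cvC P ((t:Int)+1) ∧
    ∀ m : Nat, (cvStepA P st t).1.getD m 0
      = cvS P ((t:Int)+1) m + (if 1 ≤ m ∧ m < t+1 then cvC P ((m:Int)+1) else 0) := by
  have hKsucc := cvC_succ P t ht1
  have hSsucc := fun m : Int => cvS_succ P t m ht1
  -- characterize the intermediate state s1
  have hs1 :
      (cvS1 P st t).1.length = P.length ∧ (cvS1 P st t).2 = cvC P ((t:Int)+1) ∧
        ∀ m : Nat, (cvS1 P st t).1.getD m 0 = cvS P ((t:Int)+1) m + (if 1 ≤ m ∧ m < t then cvC P ((m:Int)+1) else 0) := by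
    unfold cvS1
    by_cases hne : PySem.List.pyGetD P ((t:Int)-1) 0 = PySem.List.pyGetD P (t:Int) 0
    · simp only [hne, ne_eq, not_true_eq_false, if_false]
      refine ⟨hL, ?_, ?_⟩
      · rw [hK, hKsucc, if_neg (by simp [hne])]; ring
      · intro m
        rw [hG m, hSsucc m]
        have hz : cvStep P (t:Int) m = 0 := by
          unfold cvStep
          rw [if_neg (by rw [hne]; omega)]
        rw [hz]; ring
    · simp only [ne_eq, hne, not_false_eq_true, if_true]
      by_cases hab : PySem.List.pyGetD P ((t:Int)-1) 0 < PySem.List.pyGetD P (t:Int) 0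
      · have hmem : (t:Int) ∈ PySem.List.pyRange 1 (P.length : Int) 1 := by
          rw [PySem.List.mem_pyRange_one]
          omega
        obtain ⟨ha0, hbn⟩ := hpre (t:Int) hmem hab
        obtain ⟨hIL, hIG⟩ := innerAdd (t:Int) (PySem.List.pyGetD P ((t:Int)-1) 0)
          (PySem.List.pyGetD P (t:Int) 0) st.1 ha0 (by rw [hL]; exact hbn)
        refine ⟨by rw [hIL, hL], by rw [hK, hKsucc, if_pos hne], ?_⟩
        intro m
        rw [hIG m, hG m, hSsucc m]
        unfold cvStep
        ring
      · have hempty : PySem.List.pyRange (PySem.List.pyGetD P ((t:Int)-1) 0) (PySem.List.pyGetD P (t:Int) 0) 1 = [] :=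
          PySem.List.pyRange_one_eq_nil (by omega)
        rw [hempty]
        simp only [List.foldl_nil]
        refine ⟨hL, by rw [hK, hKsucc, if_pos hne], ?_⟩
        intro m
        rw [hG m, hSsucc m]
        have hz : cvStep P (t:Int) m = 0 := by
          unfold cvStep
          rw [if_neg (by omega)]
        rw [hz]; ring
  obtain ⟨hs1L, hs1K, hs1G⟩ := hs1
  rw [cvStepA_eq]
  constructor
  · rw [PySem.List.pySetD_of_nonneg _ _ (Int.natCast_nonneg t)]
    simpa using hs1L
  constructor
  · exact hs1K
  · intro m
    rw [PySem.List.pySetD_of_nonneg _ _ (Int.natCast_nonneg t),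
        PySem.List.pyGetD_of_nonneg _ _ (Int.natCast_nonneg t), Int.toNat_natCast]
    by_cases hm : m = t
    · subst hm
      rw [cvGetD_set_self _ _ _ (by rw [hs1L]; omega)]
      rw [hs1G m, hs1K]
      rw [if_neg (by omega), if_pos (by omega)]
      ring
    · rw [cvGetD_set_ne _ _ _ _ (fun h => hm h.symm)]
      rw [hs1G m]
      by_cases hc : 1 ≤ m ∧ m < t
      · rw [if_pos hc, if_pos (by omega)]
      · rw [if_neg hc, if_neg (by omega)]

-- A's outer loop invariant
theorem outerA (P : List Int) (hpre : Pre_cluster_vertices P) :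
    ∀ t : Nat, t ≤ P.length →
    ((PySem.List.pyRange 1 (t : Int) 1).foldl (cvStepA P) (List.replicate P.length 0, 0)).1.length
        = P.length ∧
    ((PySem.List.pyRange 1 (t : Int) 1).foldl (cvStepA P) (List.replicate P.length 0, 0)).2
        = cvC P t ∧
    ∀ m : Nat,
      ((PySem.List.pyRange 1 (t : Int) 1).foldl (cvStepA P) (List.replicate P.length 0, 0)).1.getD m 0
        = cvS P t m + (if 1 ≤ m ∧ m < t then cvC P ((m : Int)+1) else 0) := by
  intro t
  induction t with
  | zero =>
    intro _
    rw [show (((0:Nat)) : Int) = 0 by norm_num, PySem.List.pyRange_one_eq_nil (by norm_num)]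
    refine ⟨by simp, by rw [cvC_le_one P 0 (by norm_num)]; rfl, ?_⟩
    intro m
    simp only [List.foldl_nil, cvGetD_replicate]
    rw [cvS_le_one P 0 m (by norm_num)]
    have : ¬ (1 ≤ m ∧ m < 0) := by omega
    rw [if_neg this]; norm_num
  | succ t ih =>
    intro ht
    by_cases ht0 : t = 0
    · subst ht0
      rw [show (((0+1:Nat)) : Int) = 1 by norm_num, PySem.List.pyRange_one_eq_nil (le_refl 1)]
      refine ⟨by simp, by rw [cvC_le_one P 1 (le_refl 1)]; rfl, ?_⟩
      intro m
      simp only [List.foldl_nil, cvGetD_replicate]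
      rw [cvS_le_one P 1 m (le_refl 1)]
      have : ¬ (1 ≤ m ∧ m < 0 + 1) := by omega
      rw [if_neg this]; norm_num
    · have ht1 : 1 ≤ t := Nat.one_le_iff_ne_zero.mpr ht0
      obtain ⟨ihL, ihK, ihG⟩ := ih (by omega)
      have hcast : (((t+1 : Nat)) : Int) = (t:Int)+1 := by push_cast; ring
      rw [hcast, PySem.List.pyRange_one_succ_right (by exact_mod_cast ht1), List.foldl_append]
      simp only [List.foldl_cons, List.foldl_nil]
      exact stepA_char P hpre t ht1 ht _ ihL ihK ihG
-- prefix sums under a single point update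
theorem sumTo_set (d : List Int) (a : Nat) (ha : a < d.length) (i : Int) (m : Nat) :
    sumTo (d.set a (d.getD a 0 + i)) m = sumTo d m + (if a ≤ m then i else 0) := by
  induction m with
  | zero =>
    have hz : ∀ e : List Int, sumTo e 0 = e.getD 0 0 := by intro e; simp [sumTo]
    rw [hz, hz]
    by_cases h0 : a = 0
    · subst h0
      rw [cvGetD_set_self d 0 _ ha]
      simp
    · rw [cvGetD_set_ne d a 0 _ h0]
      simp [h0]
  | succ m ih =>
    rw [sumTo_succ, sumTo_succ, ih]
    by_cases hm : a = m + 1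
    · subst hm
      rw [cvGetD_set_self d _ _ ha]
      have h1 : ¬ (m + 1 ≤ m) := by omega
      simp [h1]
      ring
    · rw [cvGetD_set_ne d a (m+1) _ hm]
      by_cases hle : a ≤ m
      · have : a ≤ m + 1 := by omega
        simp [hle, this]; ring
      · have : ¬ a ≤ m + 1 := by omega
        simp [hle, this]

theorem sumTo_replicate (k m : Nat) : sumTo (List.replicate k (0:Int)) m = 0 := by
  induction m with
  | zero => simp [sumTo]
  | succ m ih => rw [sumTo_succ, ih, cvGetD_replicate]; ring

theorem sumTo_set_sub (d : List Int) (a : Nat) (ha : a < d.length) (i : Int) (m : Nat) :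
    sumTo (d.set a (d.getD a 0 - i)) m = sumTo d m + (if a ≤ m then -i else 0) := by
  have h := sumTo_set d a ha (-i) m
  rw [sub_eq_add_neg]
  exact h

-- one step of B's difference-array loop preserves the prefix-sum invariant
theorem stepD_char (P : List Int) (hpre : Pre_cluster_vertices P) (t : Nat)
    (ht1 : 1 ≤ t) (ht : t + 1 ≤ P.length)
    (d : List Int) (hL : d.length = P.length + 1)
    (hSum : ∀ m : Nat, sumTo d m = cvS P t m) :
    (cvStepD P d t).length = P.length + 1 ∧
    ∀ m : Nat, sumTo (cvStepD P d t) m = cvS P ((t:Int)+1) m := by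
  have hSsucc := fun m : Int => cvS_succ P t m ht1
  simp only [cvStepD]
  by_cases hab : PySem.List.pyGetD P ((t:Int)-1) 0 < PySem.List.pyGetD P (t:Int) 0
  · rw [if_pos hab]
    have hmem : (t:Int) ∈ PySem.List.pyRange 1 (P.length : Int) 1 := by
      rw [PySem.List.mem_pyRange_one]
      omega
    obtain ⟨ha0, hbn⟩ := hpre (t:Int) hmem hab
    have hb0 : 0 ≤ PySem.List.pyGetD P (t:Int) 0 := le_trans ha0 (le_of_lt hab)
    rw [PySem.List.pySetD_of_nonneg _ _ ha0, PySem.List.pyGetD_of_nonneg _ _ ha0]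
    rw [PySem.List.pySetD_of_nonneg _ _ hb0, PySem.List.pyGetD_of_nonneg _ _ hb0]
    have halen : (PySem.List.pyGetD P ((t:Int)-1) 0).toNat < d.length := by omega
    have hblen : (PySem.List.pyGetD P (t:Int) 0).toNat
        < (d.set (PySem.List.pyGetD P ((t:Int)-1) 0).toNat
            (d.getD (PySem.List.pyGetD P ((t:Int)-1) 0).toNat 0 + (t:Int))).length := by
      rw [List.length_set]; omega
    refine ⟨by simp [hL], ?_⟩
    intro m
    rw [sumTo_set_sub _ _ hblen (t:Int) m, sumTo_set _ _ halen (t:Int) m]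
    rw [hSum m, hSsucc m]
    unfold cvStep
    generalize cvS P (t:Int) m = c
    split_ifs <;> omega
  · rw [if_neg hab]
    refine ⟨hL, ?_⟩
    intro m
    rw [hSum m, hSsucc m]
    have hz : cvStep P (t:Int) m = 0 := by
      unfold cvStep
      rw [if_neg (by omega)]
    rw [hz]; ring

-- B's difference-array loop invariant, via prefix sums
theorem diffB (P : List Int) (hpre : Pre_cluster_vertices P) :
    ∀ t : Nat, t ≤ P.length →
    ((PySem.List.pyRange 1 (t : Int) 1).foldl (cvStepD P) (List.replicate (P.length + 1) 0)).length
        = P.length + 1 ∧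
    ∀ m : Nat,
      sumTo ((PySem.List.pyRange 1 (t : Int) 1).foldl (cvStepD P) (List.replicate (P.length + 1) 0)) m
        = cvS P t m := by
  intro t
  induction t with
  | zero =>
    intro _
    rw [show (((0:Nat)) : Int) = 0 by norm_num, PySem.List.pyRange_one_eq_nil (by norm_num)]
    refine ⟨by simp, ?_⟩
    intro m
    simp only [List.foldl_nil]
    rw [sumTo_replicate, cvS_le_one P 0 m (by norm_num)]
  | succ t ih =>
    intro ht
    by_cases ht0 : t = 0
    · subst ht0
      rw [show (((0+1:Nat)) : Int) = 1 by norm_num, PySem.List.pyRange_one_eq_nil (le_refl 1)]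
      refine ⟨by simp, ?_⟩
      intro m
      simp only [List.foldl_nil]
      rw [sumTo_replicate, cvS_le_one P 1 m (le_refl 1)]
    · have ht1 : 1 ≤ t := Nat.one_le_iff_ne_zero.mpr ht0
      obtain ⟨ihL, ihSum⟩ := ih (by omega)
      have hcast : (((t+1 : Nat)) : Int) = (t:Int)+1 := by push_cast; ring
      rw [hcast, PySem.List.pyRange_one_succ_right (by exact_mod_cast ht1), List.foldl_append]
      simp only [List.foldl_cons, List.foldl_nil]
      exact stepD_char P hpre t ht1 ht _ ihL ihSum

theorem sumTo_pred (d : List Int) (t : Nat) (h : 1 ≤ t) :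
    sumTo d (t-1) + d.getD t 0 = sumTo d t := by
  obtain ⟨u, rfl⟩ : ∃ u, t = u + 1 := ⟨t-1, by omega⟩
  simp [sumTo_succ]

-- one step of B's fused loop, tracking A's grouping fold
theorem stepB_char (P diff arr : List Int)
    (hsum : ∀ m : Nat, sumTo diff m = cvS P (P.length) m)
    (harr : ∀ m : Int, 0 ≤ m → m < (P.length : Int) → PySem.List.pyGetD arr m 0 = cvG P m)
    (t : Nat) (ht1 : 1 ≤ t) (ht : t + 1 ≤ P.length)
    (s : List (List Int) × Int × Int × Int)
    (hv : s.1 = (PySem.List.pyRange 1 (t:Int) 1).foldl (cvGroupA arr) [[1]])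
    (hr : s.2.1 = sumTo diff (t-1))
    (hp : s.2.2.1 = cvG P ((t:Int)-1))
    (hk : s.2.2.2 = cvC P t) :
    (cvStepB P diff s t).1 = (PySem.List.pyRange 1 ((t:Int)+1) 1).foldl (cvGroupA arr) [[1]] ∧
    (cvStepB P diff s t).2.1 = sumTo diff t ∧
    (cvStepB P diff s t).2.2.1 = cvG P (t:Int) ∧
    (cvStepB P diff s t).2.2.2 = cvC P ((t:Int)+1) := by
  have hrun' : s.2.1 + PySem.List.pyGetD diff (t:Int) 0 = sumTo diff t := by
    rw [hr, PySem.List.pyGetD_of_nonneg _ _ (Int.natCast_nonneg t), Int.toNat_natCast]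
    exact sumTo_pred diff t ht1
  have hk' : (if PySem.List.pyGetD P ((t:Int)-1) 0 ≠ PySem.List.pyGetD P (t:Int) 0
        then s.2.2.2 + 1 else s.2.2.2) = cvC P ((t:Int)+1) := by
    rw [cvC_succ P t ht1, hk]
    by_cases hcond : PySem.List.pyGetD P ((t:Int)-1) 0 = PySem.List.pyGetD P (t:Int) 0
    · rw [if_neg (not_not_intro hcond), if_neg (not_not_intro hcond)]; ring
    · rw [if_pos hcond, if_pos hcond]
  have hcur : sumTo diff t + cvC P ((t:Int)+1) = cvG P (t:Int) := by
    unfold cvG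
    rw [hsum t, if_pos (by omega : (1:Int) ≤ (t:Int))]
  simp only [cvStepB]
  refine ⟨?_, ?_, ?_, ?_⟩
  · rw [hrun', hk', hcur, hp, hv]
    rw [PySem.List.pyRange_one_succ_right (by omega : (1:Int) ≤ (t:Int)), List.foldl_append]
    simp only [List.foldl_cons, List.foldl_nil]
    unfold cvGroupA
    rw [harr ((t:Int)-1) (by omega) (by omega), harr (t:Int) (by omega) (by omega)]
    by_cases hgg : cvG P ((t:Int)-1) = cvG P (t:Int)
    · rw [if_pos hgg, if_pos hgg.symm]
    · rw [if_neg hgg, if_neg (fun h => hgg h.symm)]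
  · exact hrun'
  · rw [hrun', hk', hcur]
  · exact hk'

-- B's fused loop tracks A's grouping fold
theorem fusedB (P : List Int) (diff : List Int)
    (hsum : ∀ m : Nat, sumTo diff m = cvS P (P.length) m)
    (arr : List Int)
    (harr : ∀ m : Int, 0 ≤ m → m < (P.length : Int) → PySem.List.pyGetD arr m 0 = cvG P m) :
    ∀ t : Nat, 1 ≤ t → t ≤ P.length →
    ((PySem.List.pyRange 1 (t : Int) 1).foldl (cvStepB P diff)
        ([[1]], PySem.List.pyGetD diff 0 0, PySem.List.pyGetD diff 0 0, 0)).1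
      = (PySem.List.pyRange 1 (t : Int) 1).foldl (cvGroupA arr) [[1]] ∧
    ((PySem.List.pyRange 1 (t : Int) 1).foldl (cvStepB P diff)
        ([[1]], PySem.List.pyGetD diff 0 0, PySem.List.pyGetD diff 0 0, 0)).2.1
      = sumTo diff (t-1) ∧
    ((PySem.List.pyRange 1 (t : Int) 1).foldl (cvStepB P diff)
        ([[1]], PySem.List.pyGetD diff 0 0, PySem.List.pyGetD diff 0 0, 0)).2.2.1
      = cvG P ((t : Int) - 1) ∧
    ((PySem.List.pyRange 1 (t : Int) 1).foldl (cvStepB P diff)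
        ([[1]], PySem.List.pyGetD diff 0 0, PySem.List.pyGetD diff 0 0, 0)).2.2.2
      = cvC P t := by
  intro t
  induction t with
  | zero => intro h; omega
  | succ t ih =>
    intro _ ht
    by_cases ht0 : t = 0
    · subst ht0
      rw [show (((0+1:Nat)) : Int) = 1 by norm_num, PySem.List.pyRange_one_eq_nil (le_refl 1)]
      simp only [List.foldl_nil]
      have h0 : PySem.List.pyGetD diff 0 0 = sumTo diff 0 := by
        rw [PySem.List.pyGetD_of_nonneg _ _ (le_refl 0)]
        simp [sumTo]
      refine ⟨?_, ?_, ?_, ?_⟩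
      · trivial
      · simpa using h0
      · rw [h0]
        unfold cvG
        rw [hsum 0]
        norm_num
      · rw [cvC_le_one P 1 (le_refl 1)]
    · have ht1 : 1 ≤ t := Nat.one_le_iff_ne_zero.mpr ht0
      obtain ⟨ihV, ihR, ihP, ihK⟩ := ih ht1 (by omega)
      have hcast : (((t+1 : Nat)) : Int) = (t:Int)+1 := by push_cast; ring
      rw [hcast, PySem.List.pyRange_one_succ_right (by exact_mod_cast ht1), List.foldl_append]
      simp only [List.foldl_cons, List.foldl_nil]
      obtain ⟨h1, h2, h3, h4⟩ := stepB_char P diff arr hsum harr t ht1 ht _ ihV ihR ihP ihK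
      refine ⟨by rw [h1, PySem.List.pyRange_one_succ_right (by omega : (1:Int) ≤ (t:Int))],
        by rw [h2, Nat.add_sub_cancel], ?_, by rw [h4]⟩
      rw [show ((t:Int)+1-1) = (t:Int) from by ring]
      exact h3

-- ===== VERDICT (by name: the statement is the Claim_ definition above) =====
theorem cluster_vertices_spec : Claim_equal_cluster_vertices := by
  intro P _ hpre
  unfold Spec_cluster_vertices
  simp only [cluster_vertices, cluster_vertices_alt]
  by_cases hn0 : P.length = 0
  · rw [hn0]
    rfl
  · have hn1 : 1 ≤ P.length := Nat.one_le_iff_ne_zero.mpr hn0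
    obtain ⟨hAL, hAK, hAG⟩ := outerA P hpre P.length (le_refl _)
    obtain ⟨hDL, hDSum⟩ := diffB P hpre P.length (le_refl _)
    have harr : ∀ m : Int, 0 ≤ m → m < (P.length : Int) →
        PySem.List.pyGetD
          ((PySem.List.pyRange 1 (P.length : Int) 1).foldl (cvStepA P)
            (List.replicate P.length 0, 0)).1 m 0 = cvG P m := by
      intro m hm0 hmn
      rw [PySem.List.pyGetD_of_nonneg _ _ hm0, hAG m.toNat]
      have hc : ((m.toNat : Nat) : Int) = m := Int.toNat_of_nonneg hm0
      rw [hc]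
      unfold cvG
      by_cases h1 : 1 ≤ m
      · rw [if_pos (by omega : 1 ≤ m.toNat ∧ m.toNat < P.length), if_pos h1]
      · rw [if_neg (by omega : ¬ (1 ≤ m.toNat ∧ m.toNat < P.length)), if_neg h1]
    have hfin := fusedB P _ hDSum _ harr P.length hn1 (le_refl _)
    exact hfin.1.symm
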